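-- pv_equiv track=rewrite | github.com/BenJCross1995/av_distributions | src/lambdaG_paraphrase.py | continuation_counts
-- ===== SOURCE A (Python) =====
-- from collections import Counter, defaultdict
--
-- def continuation_counts(counts, n):
--     cont = Counter()
--     seen = defaultdict(set)
--     for w1_to_wn, c in counts[n].items():
--         w_context = w1_to_wn[:-1]
--         w_last = w1_to_wn[-1]
--         seen[w_last].add(w_context)
--     for w, ctxts in seen.items():
--         cont[w] = len(ctxts)
--     return cont
-- ===== SOURCE B (Python) =====
-- from collections import Counter
--
-- def continuation_counts(counts, n):
--     # Every key of counts[n] is a distinct n-gram, so each (context, last-word)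
--     # pair occurs exactly once: counting last words directly equals counting
--     # distinct contexts per last word.
--     return Counter(ngram[-1] for ngram in counts[n])
-- ===== Notes on version B (the rewrite author's own statement) =====
-- stated objective: simpler
-- what changed: Replaces the defaultdict-of-context-sets plus a second aggregation loop with a single Counter over the last word of each n-gram key, relying on dict keys being unique so every (context, last-word) pair is distinct.
import Mathlib
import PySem

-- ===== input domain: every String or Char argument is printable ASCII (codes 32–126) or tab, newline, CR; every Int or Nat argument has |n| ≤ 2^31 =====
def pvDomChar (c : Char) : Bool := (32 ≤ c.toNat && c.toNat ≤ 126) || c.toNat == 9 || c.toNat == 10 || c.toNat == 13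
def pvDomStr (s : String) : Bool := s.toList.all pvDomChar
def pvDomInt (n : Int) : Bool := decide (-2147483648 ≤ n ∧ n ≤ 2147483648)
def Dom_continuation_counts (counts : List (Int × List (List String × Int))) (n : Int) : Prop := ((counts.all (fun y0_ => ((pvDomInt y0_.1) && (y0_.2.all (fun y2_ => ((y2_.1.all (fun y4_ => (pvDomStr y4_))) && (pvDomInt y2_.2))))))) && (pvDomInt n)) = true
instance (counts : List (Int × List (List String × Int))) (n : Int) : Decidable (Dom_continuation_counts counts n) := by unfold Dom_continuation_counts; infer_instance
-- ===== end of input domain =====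

-- B replaces A's defaultdict-of-context-sets + second aggregation loop by a single
-- Counter over the last word of each n-gram key (objective: simpler).

-- ===== PORT A =====
def continuation_counts (counts : List (Int × List (List String × Int))) (n : Int) : List (String × Int) :=
  -- counts[n].items(): dict lookup (KeyError excluded by Pre_)
  let items := (PySem.Dict.mk counts).getD n []
  -- seen = defaultdict(set); for (w1_to_wn, c): seen[w1_to_wn[-1]].add(w1_to_wn[:-1])
  let seen : PySem.Dict String (PySem.Set (List String)) :=
    items.foldl (fun seen p =>
      seen.modify (PySem.List.pyGetD p.1 (-1) "") PySem.Set.empty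
        (fun s => PySem.Set.add s (PySem.List.slice p.1 none (some (-1)))))
      PySem.Dict.empty
  -- cont = Counter(); for (w, ctxts) in seen.items(): cont[w] = len(ctxts)
  let cont : PySem.Dict String Int :=
    seen.items.foldl (fun cont p => cont.insert p.1 (PySem.Set.len p.2)) PySem.Dict.empty
  cont.items

-- ===== PORT B =====
def continuation_counts_alt (counts : List (Int × List (List String × Int))) (n : Int) : List (String × Int) :=
  -- Counter(ngram[-1] for ngram in counts[n])
  (PySem.Dict.counter
    (((PySem.Dict.mk counts).getD n []).map (fun p => PySem.List.pyGetD p.1 (-1) ""))).items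

-- ===== PRECONDITION & SPEC =====
-- Pre_ excludes the inputs on which A raises (n not a key of counts → KeyError; an empty
-- n-gram key → IndexError) and, as a representation artefact, association lists whose
-- n-gram keys are duplicated: duplicate keys cannot arise from a Python dict, and on them
-- counting (B) and context-set size (A) legitimately differ.
def Pre_continuation_counts (counts : List (Int × List (List String × Int))) (n : Int) : Prop :=
  (PySem.Dict.mk counts).contains n = true ∧
  (∀ p ∈ (PySem.Dict.mk counts).getD n [], p.1 ≠ []) ∧
  (((PySem.Dict.mk counts).getD n []).map (·.1)).Nodup
instance (counts : List (Int × List (List String × Int))) (n : Int) : Decidable (Pre_continuation_counts counts n) := by unfold Pre_continuation_counts; infer_instance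

def pvWitness_continuation_counts : (List (Int × List (List String × Int))) × Int :=
  ([(0, [(["a", "b"], 1), (["c", "b"], 1), (["d"], 2)])], 0)

def Spec_continuation_counts (counts : List (Int × List (List String × Int))) (n : Int) (out : List (String × Int)) : Prop := out = continuation_counts_alt counts n
instance (counts : List (Int × List (List String × Int))) (n : Int) (out : List (String × Int)) : Decidable (Spec_continuation_counts counts n out) := by unfold Spec_continuation_counts; infer_instance

-- ===== CLAIM (what is proved, stated in full; the proofs are below) =====
def Claim_equal_continuation_counts : Prop := ∀ (counts : List (Int × List (List String × Int))) (n : Int), Dom_continuation_counts counts n → Pre_continuation_counts counts n → Spec_continuation_counts counts n (continuation_counts counts n)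

-- ===== LEMMAS AND PROOFS =====

-- a nonempty n-gram is its context followed by its last word
theorem pv_ngram_recon (xs : List String) (h : xs ≠ []) :
    PySem.List.slice xs none (some (-1)) ++ [PySem.List.pyGetD xs (-1) ""] = xs := by
  rw [PySem.List.slice_to_neg_one, PySem.List.pyGetD_neg_one xs "" h,
    List.dropLast_append_getLast h]

-- the value of A's `seen` dict at any key, under distinct nonempty n-gram keys:
-- it is the list of contexts of the processed items whose last word is that key
theorem pv_seen_getD (items : List (List String × Int))
    (d : PySem.Dict String (PySem.Set (List String)))
    (hne : ∀ p ∈ items, p.1 ≠ []) (hnd : (items.map (·.1)).Nodup)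
    (hfresh : ∀ p ∈ items,
      PySem.List.slice p.1 none (some (-1)) ∉
        d.getD (PySem.List.pyGetD p.1 (-1) "") PySem.Set.empty)
    (w : String) :
    (items.foldl (fun seen p =>
        seen.modify (PySem.List.pyGetD p.1 (-1) "") PySem.Set.empty
          (fun s => PySem.Set.add s (PySem.List.slice p.1 none (some (-1))))) d).getD
        w PySem.Set.empty
      = d.getD w PySem.Set.empty ++
        (items.filter (fun p => PySem.List.pyGetD p.1 (-1) "" = w)).map
          (fun p => PySem.List.slice p.1 none (some (-1))) := by
  induction items generalizing d with
  | nil => simp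
  | cons p rest ih =>
    simp only [List.foldl_cons, List.filter_cons, List.map_cons] at *
    simp only [PySem.Set.empty] at *
    have hpne : p.1 ≠ [] := hne p (by simp)
    have hpfresh := hfresh p (by simp)
    have hadd : PySem.Set.add (d.getD (PySem.List.pyGetD p.1 (-1) "") [])
        (PySem.List.slice p.1 none (some (-1)))
        = d.getD (PySem.List.pyGetD p.1 (-1) "") [] ++
          [PySem.List.slice p.1 none (some (-1))] := by
      simp [PySem.Set.add, PySem.Set.contains, hpfresh]
    have h1 : ∀ q ∈ rest, q.1 ≠ [] := fun q hq => hne q (by simp [hq])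
    have h2 : (rest.map (·.1)).Nodup := hnd.of_cons
    have h3 : ∀ q ∈ rest,
        PySem.List.slice q.1 none (some (-1)) ∉
          (d.modify (PySem.List.pyGetD p.1 (-1) "") []
            (fun s => PySem.Set.add s (PySem.List.slice p.1 none (some (-1))))).getD
            (PySem.List.pyGetD q.1 (-1) "") [] := by
      intro q hq
      rw [PySem.Dict.getD_modify]
      by_cases hk : PySem.List.pyGetD q.1 (-1) "" = PySem.List.pyGetD p.1 (-1) ""
      · rw [if_pos hk, hadd]
        have hq1 : q.1 ≠ p.1 := by
          intro hcontr
          have : p.1 ∈ rest.map (·.1) := by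
            rw [← hcontr]; exact List.mem_map_of_mem hq
          exact (List.nodup_cons.mp hnd).1 this
        have hctx : PySem.List.slice q.1 none (some (-1)) ≠
            PySem.List.slice p.1 none (some (-1)) := by
          intro hceq
          apply hq1
          rw [← pv_ngram_recon q.1 (h1 q hq), ← pv_ngram_recon p.1 hpne, hceq, hk]
        intro hmem
        rcases List.mem_append.mp hmem with h | h
        · exact hfresh q (by simp [hq]) (by rwa [hk])
        · exact hctx (List.mem_singleton.mp h)
      · rw [if_neg hk]
        exact hfresh q (by simp [hq])
    rw [ih _ h1 h2 h3, PySem.Dict.getD_modify]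
    by_cases hw : w = PySem.List.pyGetD p.1 (-1) ""
    · rw [if_pos hw, hadd, hw]
      simp [List.append_assoc]
    · rw [if_neg hw]
      simp [Ne.symm hw]

-- the core equality on the item list of counts[n]
theorem pv_core (items : List (List String × Int))
    (hne : ∀ p ∈ items, p.1 ≠ []) (hnd : (items.map (·.1)).Nodup) :
    ((items.foldl (fun seen p =>
          seen.modify (PySem.List.pyGetD p.1 (-1) "") PySem.Set.empty
            (fun s => PySem.Set.add s (PySem.List.slice p.1 none (some (-1)))))
          (PySem.Dict.empty : PySem.Dict String (PySem.Set (List String)))).items.foldl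
        (fun cont p => cont.insert p.1 (PySem.Set.len p.2))
        (PySem.Dict.empty : PySem.Dict String Int)).items
    = (PySem.Dict.counter (items.map (fun p => PySem.List.pyGetD p.1 (-1) ""))).items := by
  set lastf := (fun p : List String × Int => PySem.List.pyGetD p.1 (-1) "") with hlastf
  set seen := (items.foldl (fun seen p =>
      seen.modify (lastf p) PySem.Set.empty
        (fun s => PySem.Set.add s (PySem.List.slice p.1 none (some (-1)))))
      PySem.Dict.empty : PySem.Dict String (PySem.Set (List String))) with hseen
  have hkeys : seen.keys = PySem.Set.ofList (items.map lastf) := by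
    rw [hseen, PySem.Dict.keys_foldl_modify_key items lastf PySem.Set.empty
      (fun _ p => fun s => PySem.Set.add s (PySem.List.slice p.1 none (some (-1))))]
    simp [PySem.Set.update, PySem.Set.ofList_eq_foldl, PySem.Dict.keys_empty]
  have hkn : seen.keys.Nodup := by
    rw [hseen]
    exact PySem.Dict.nodup_keys_foldl_modify_key items lastf PySem.Set.empty
      (fun _ p => fun s => PySem.Set.add s (PySem.List.slice p.1 none (some (-1))))
      PySem.Dict.empty (by simp)
  show (seen.items.foldl (fun cont p => cont.insert p.1 (PySem.Set.len p.2))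
      PySem.Dict.empty).items = _
  rw [PySem.Dict.items_foldl_insert_fresh seen.items (fun p => p.1)
      (fun p => PySem.Set.len p.2) PySem.Dict.empty (by simp)
      (by simpa [PySem.Dict.keys] using hkn)]
  rw [PySem.Dict.items_counter]
  have hemp : (PySem.Dict.empty : PySem.Dict String Int).items = [] := rfl
  rw [hemp, List.nil_append]
  rw [PySem.Dict.items_eq_map_keys seen hkn PySem.Set.empty]
  rw [hkeys, List.map_map]
  apply List.map_congr_left
  intro w hw
  simp only [Function.comp_apply, Prod.mk.injEq, true_and]
  have hg := pv_seen_getD items PySem.Dict.empty hne hnd (by simp) w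
  rw [← hseen] at hg
  rw [hg]
  simp only [PySem.Set.len, PySem.Set.empty, PySem.Dict.getD_empty, List.nil_append, List.length_map]
  rw [← List.countP_eq_length_filter, List.count, List.countP_map]
  congr 1

-- ===== VERDICT (by name: the statement is the Claim_ definition above) =====
theorem continuation_counts_spec : Claim_equal_continuation_counts := by
  intro counts n _ hpre
  obtain ⟨-, hne, hnd⟩ := hpre
  show continuation_counts counts n = continuation_counts_alt counts n
  unfold continuation_counts continuation_counts_alt
  exact pv_core ((PySem.Dict.mk counts).getD n []) hne hnd
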